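-- pv_equiv track=rewrite | github.com/sil-ai/shared-skills | skills/vref-to-usfm/scripts/vref_to_usfm.py | convert_to_sfm
-- ===== SOURCE A (Python) =====
-- from collections import defaultdict
--
-- def convert_to_sfm(
--     refs: list[tuple[str, int, int]],
--     texts: list[str],
--     book_filter: str | None = None,
-- ) -> dict[str, list[str]]:
--     """
--     Convert aligned refs and texts to SFM format.
--
--     Returns dict mapping book code to list of SFM lines.
--     """
--     if len(refs) != len(texts):
--         raise ValueError(
--             f"Mismatch: {len(refs)} refs but {len(texts)} text lines"
--         )
--
--     # Group by book
--     books: dict[str, list[str]] = defaultdict(list)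
--     current_book = None
--     current_chapter = None
--
--     i = 0
--     while i < len(refs):
--         book, chapter, verse = refs[i]
--         text = texts[i].strip()
--
--         # Skip if filtering to a specific book
--         if book_filter and book != book_filter:
--             i += 1
--             continue
--
--         # Skip empty lines and <range> markers (range is handled by previous verse)
--         if not text or text == "<range>":
--             i += 1
--             continue
--
--         # New book
--         if book != current_book:
--             current_book = book
--             current_chapter = None
--             books[book].append(f"\\id {book}")
--
--         # New chapter
--         if chapter != current_chapter:
--             current_chapter = chapter
--             books[book].append(f"\\c {chapter}")
--
--         # Look ahead for <range> markers to determine verse range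
--         end_verse = verse
--         j = i + 1
--         while j < len(refs):
--             next_book, next_chapter, next_verse = refs[j]
--             next_text = texts[j].strip()
--             # Stop if different book/chapter or not a range marker
--             if next_book != book or next_chapter != chapter or next_text != "<range>":
--                 break
--             end_verse = next_verse
--             j += 1
--
--         # Add verse (with range if applicable)
--         if end_verse > verse:
--             books[book].append(f"\\v {verse}-{end_verse} {text}")
--         else:
--             books[book].append(f"\\v {verse} {text}")
--
--         i += 1
--
--     return dict(books)
-- ===== SOURCE B (Python) =====
-- def convert_to_sfm(
--     refs: list[tuple[str, int, int]],
--     texts: list[str],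
--     book_filter: str | None = None,
-- ) -> dict[str, list[str]]:
--     """
--     Convert aligned refs and texts to SFM format.
--
--     Single forward pass: a <range> marker rewrites the last emitted verse
--     line in place instead of being gathered by a look-ahead scan.
--     Returns dict mapping book code to list of SFM lines.
--     """
--     if len(refs) != len(texts):
--         raise ValueError(
--             f"Mismatch: {len(refs)} refs but {len(texts)} text lines"
--         )
--
--     books: dict[str, list[str]] = {}
--     current_book = None
--     current_chapter = None
--     # (book, chapter, start_verse, text, index of the line inside books[book])
--     pending = None
--
--     for (book, chapter, verse), raw in zip(refs, texts):
--         text = raw.strip()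
--
--         if book_filter and book != book_filter:
--             pending = None
--             continue
--
--         if text == "<range>":
--             if pending is not None and pending[0] == book and pending[1] == chapter:
--                 _, _, start, ptext, idx = pending
--                 if verse > start:
--                     books[book][idx] = f"\\v {start}-{verse} {ptext}"
--                 else:
--                     books[book][idx] = f"\\v {start} {ptext}"
--             else:
--                 pending = None
--             continue
--
--         if not text:
--             pending = None
--             continue
--
--         if book != current_book:
--             current_book = book
--             current_chapter = None
--             books.setdefault(book, []).append(f"\\id {book}")
--
--         if chapter != current_chapter:
--             current_chapter = chapter
--             books.setdefault(book, []).append(f"\\c {chapter}")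
--
--         lines = books.setdefault(book, [])
--         lines.append(f"\\v {verse} {text}")
--         pending = (book, chapter, verse, text, len(lines) - 1)
--
--     return books
-- ===== Notes on version B (the rewrite author's own statement) =====
-- stated objective: alternative
-- what changed: Replaces A's indexed while-loop with an inner look-ahead scan for <range> markers by a single forward pass over zip(refs, texts) that keeps a pending record of the last emitted verse line and rewrites that stored line in place when a matching <range> marker arrives, clearing pending on any interrupting line.
import Mathlib
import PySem

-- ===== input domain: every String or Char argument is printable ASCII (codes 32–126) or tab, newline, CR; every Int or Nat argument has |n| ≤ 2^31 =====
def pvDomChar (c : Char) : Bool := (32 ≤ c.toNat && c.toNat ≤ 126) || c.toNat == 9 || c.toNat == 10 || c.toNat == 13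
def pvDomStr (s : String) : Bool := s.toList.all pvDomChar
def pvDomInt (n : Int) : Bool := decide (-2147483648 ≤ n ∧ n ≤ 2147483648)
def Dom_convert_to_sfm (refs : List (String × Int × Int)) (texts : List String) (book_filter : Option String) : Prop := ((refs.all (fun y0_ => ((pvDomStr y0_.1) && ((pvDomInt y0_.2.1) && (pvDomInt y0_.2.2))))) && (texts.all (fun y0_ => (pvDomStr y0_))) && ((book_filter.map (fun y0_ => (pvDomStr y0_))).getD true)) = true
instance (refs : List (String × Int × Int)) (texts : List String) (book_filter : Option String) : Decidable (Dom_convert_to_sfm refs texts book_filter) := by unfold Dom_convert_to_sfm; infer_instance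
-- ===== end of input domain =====

-- B replaces A's look-ahead scan for <range> markers by a single forward pass that
-- rewrites the last emitted verse line in place (objective: alternative, same cost).

-- ===== PORT A =====
-- shared by both ports: Python's `book_filter and book != book_filter` (an empty-string filter is falsy)
def pvBookSkip (bf : Option String) (book : String) : Bool :=
  match bf with
  | some f => f != "" && book != f
  | none => false

-- A's inner look-ahead `while j < len(refs)` over the remaining (ref, text) pairs
def pvLookA (book : String) (chapter : Int) (endv : Int) : List ((String × Int × Int) × String) → Int
  | [] => endv
  | ((nb, nc, nv), nt) :: tl =>
    if nb = book ∧ nc = chapter ∧ PySem.Str.strip nt = "<range>" then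
      pvLookA book chapter nv tl
    else endv

-- A's main `while i < len(refs)` loop; books[book].append(x) = insert book (getD book [] ++ [x])
def pvLoopA (bf : Option String) : List ((String × Int × Int) × String) →
    PySem.Dict String (List String) → Option String → Option Int → PySem.Dict String (List String)
  | [], books, _, _ => books
  | ((book, chapter, verse), t) :: tl, books, cb, cc =>
    let text := PySem.Str.strip t
    if pvBookSkip bf book then pvLoopA bf tl books cb cc
    else if text = "" ∨ text = "<range>" then pvLoopA bf tl books cb cc
    else
      let books1 := if some book ≠ cb then books.insert book (books.getD book [] ++ ["\\id " ++ book]) else books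
      let cc1 : Option Int := if some book ≠ cb then none else cc
      let books2 := if some chapter ≠ cc1 then books1.insert book (books1.getD book [] ++ ["\\c " ++ PySem.Int.toStr chapter]) else books1
      let endv := pvLookA book chapter verse tl
      let line := if endv > verse then "\\v " ++ PySem.Int.toStr verse ++ "-" ++ PySem.Int.toStr endv ++ " " ++ text
                  else "\\v " ++ PySem.Int.toStr verse ++ " " ++ text
      pvLoopA bf tl (books2.insert book (books2.getD book [] ++ [line])) (some book) (some chapter)

-- Python raises ValueError when len(refs) ≠ len(texts): excluded by Pre_; zip is exact on equal lengths
def convert_to_sfm (refs : List (String × Int × Int)) (texts : List String) (book_filter : Option String) : List (String × List String) :=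
  (pvLoopA book_filter (refs.zip texts) PySem.Dict.empty none none).items

-- ===== PORT B =====
-- B's single `for (book, chapter, verse), raw in zip(refs, texts)` pass;
-- pend = (book, chapter, start_verse, text, index of the stored line inside books[book])
def pvLoopB (bf : Option String) : List ((String × Int × Int) × String) →
    PySem.Dict String (List String) → Option String → Option Int →
    Option (String × Int × Int × String × Nat) → PySem.Dict String (List String)
  | [], books, _, _, _ => books
  | ((book, chapter, verse), raw) :: tl, books, cb, cc, pend =>
    let text := PySem.Str.strip raw
    if pvBookSkip bf book then pvLoopB bf tl books cb cc none
    else if text = "<range>" then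
      match pend with
      | some (pb, pc, start, ptext, idx) =>
        if pb = book ∧ pc = chapter then
          let line := if verse > start then "\\v " ++ PySem.Int.toStr start ++ "-" ++ PySem.Int.toStr verse ++ " " ++ ptext
                      else "\\v " ++ PySem.Int.toStr start ++ " " ++ ptext
          -- books[book][idx] = line
          pvLoopB bf tl (books.insert book ((books.getD book []).set idx line)) cb cc pend
        else pvLoopB bf tl books cb cc none
      | none => pvLoopB bf tl books cb cc none
    else if text = "" then pvLoopB bf tl books cb cc none
    else
      let books1 := if some book ≠ cb then books.insert book (books.getD book [] ++ ["\\id " ++ book]) else books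
      let cc1 : Option Int := if some book ≠ cb then none else cc
      let books2 := if some chapter ≠ cc1 then books1.insert book (books1.getD book [] ++ ["\\c " ++ PySem.Int.toStr chapter]) else books1
      let lines := books2.getD book [] ++ ["\\v " ++ PySem.Int.toStr verse ++ " " ++ text]
      pvLoopB bf tl (books2.insert book lines) (some book) (some chapter)
        (some (book, chapter, verse, text, lines.length - 1))

def convert_to_sfm_alt (refs : List (String × Int × Int)) (texts : List String) (book_filter : Option String) : List (String × List String) :=
  (pvLoopB book_filter (refs.zip texts) PySem.Dict.empty none none none).items

-- ===== PRECONDITION & SPEC =====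
-- Python A raises ValueError iff len(refs) ≠ len(texts); Pre_ excludes exactly those inputs.
def Pre_convert_to_sfm (refs : List (String × Int × Int)) (texts : List String) (book_filter : Option String) : Prop :=
  refs.length = texts.length
instance (refs : List (String × Int × Int)) (texts : List String) (book_filter : Option String) : Decidable (Pre_convert_to_sfm refs texts book_filter) := by unfold Pre_convert_to_sfm; infer_instance

def pvWitness_convert_to_sfm : (List (String × Int × Int)) × List String × Option String :=
  ([("GEN", 1, 1), ("GEN", 1, 2)], ["In the beginning", "<range>"], none)

def Spec_convert_to_sfm (refs : List (String × Int × Int)) (texts : List String) (book_filter : Option String) (out : List (String × List String)) : Prop := out = convert_to_sfm_alt refs texts book_filter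
instance (refs : List (String × Int × Int)) (texts : List String) (book_filter : Option String) (out : List (String × List String)) : Decidable (Spec_convert_to_sfm refs texts book_filter out) := by unfold Spec_convert_to_sfm; infer_instance

-- ===== CLAIM (what is proved, stated in full; the proofs are below) =====
def Claim_equal_convert_to_sfm : Prop := ∀ (refs : List (String × Int × Int)) (texts : List String) (book_filter : Option String), Dom_convert_to_sfm refs texts book_filter → Pre_convert_to_sfm refs texts book_filter → Spec_convert_to_sfm refs texts book_filter (convert_to_sfm refs texts book_filter)

-- ===== LEMMAS AND PROOFS =====

-- the final form of a (possibly ranged) verse line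
def pvFin (v e : Int) (t : String) : String :=
  if e > v then "\\v " ++ PySem.Int.toStr v ++ "-" ++ PySem.Int.toStr e ++ " " ++ t
  else "\\v " ++ PySem.Int.toStr v ++ " " ++ t

-- pending descriptor p = some (b, c, v, ptext, base, ev):
--   B's dict holds base ++ [pvFin v ev ptext] at key b (line index base.length),
--   A's dict already holds the final line computed by the look-ahead over the rest of the input
def pvAB (books : PySem.Dict String (List String))
    (p : Option (String × Int × Int × String × List String × Int))
    (l : List ((String × Int × Int) × String)) : PySem.Dict String (List String) :=
  match p with
  | none => books
  | some (b, c, v, ptext, base, ev) => books.insert b (base ++ [pvFin v (pvLookA b c ev l) ptext])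

def pvBB (books : PySem.Dict String (List String))
    (p : Option (String × Int × Int × String × List String × Int)) : PySem.Dict String (List String) :=
  match p with
  | none => books
  | some (b, _, v, ptext, base, ev) => books.insert b (base ++ [pvFin v ev ptext])

def pvPP (p : Option (String × Int × Int × String × List String × Int)) :
    Option (String × Int × Int × String × Nat) :=
  match p with
  | none => none
  | some (b, c, v, ptext, base, _) => some (b, c, v, ptext, base.length)

lemma pvLoopB_clear (bf : Option String) (hb : String) (hc hv : Int) (ht : String)
    (tl : List ((String × Int × Int) × String)) (books : PySem.Dict String (List String))
    (cb : Option String) (cc : Option Int) (b : String) (c v : Int) (ptext : String) (idx : Nat)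
    (hM : ¬(hb = b ∧ hc = c ∧ PySem.Str.strip ht = "<range>")) :
    pvLoopB bf (((hb, hc, hv), ht) :: tl) books cb cc (some (b, c, v, ptext, idx)) =
      pvLoopB bf (((hb, hc, hv), ht) :: tl) books cb cc none := by
  simp only [pvLoopB]
  by_cases hs : pvBookSkip bf hb
  · simp [hs]
  · by_cases hr : PySem.Str.strip ht = "<range>"
    · have : ¬(b = hb ∧ c = hc) := by
        rintro ⟨rfl, rfl⟩; exact hM ⟨rfl, rfl, hr⟩
      simp [hs, hr, this]
    · simp [hs, hr]

lemma pvJoint (bf : Option String) (l : List ((String × Int × Int) × String)) :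
    ∀ (books : PySem.Dict String (List String)) (cb : Option String) (cc : Option Int)
      (p : Option (String × Int × Int × String × List String × Int)),
      (∀ b c v ptext base ev, p = some (b, c, v, ptext, base, ev) →
        books.getD b [] = base ∧ pvBookSkip bf b = false) →
      pvLoopA bf l (pvAB books p l) cb cc = pvLoopB bf l (pvBB books p) cb cc (pvPP p) := by
  induction l with
  | nil =>
    intro books cb cc p hp
    cases p with
    | none => rfl
    | some q =>
      obtain ⟨b, c, v, ptext, base, ev⟩ := q
      simp [pvLoopA, pvLoopB, pvAB, pvBB, pvLookA]
  | cons head tl ih =>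
    obtain ⟨⟨hb, hc, hv⟩, ht⟩ := head
    intro books cb cc p hp
    -- the p = none case, for arbitrary state (reused below once the pending entry is discharged)
    have hnone : ∀ (books : PySem.Dict String (List String)) (cb : Option String) (cc : Option Int),
        pvLoopA bf (((hb, hc, hv), ht) :: tl) books cb cc =
          pvLoopB bf (((hb, hc, hv), ht) :: tl) books cb cc none := by
      intro books cb cc
      simp only [pvLoopA, pvLoopB]
      by_cases hs : pvBookSkip bf hb
      · simpa [hs] using ih books cb cc none (by simp)
      · by_cases hr : PySem.Str.strip ht = "<range>"
        · simpa [hs, hr] using ih books cb cc none (by simp)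
        · by_cases he : PySem.Str.strip ht = ""
          · simpa [hs, hr, he] using ih books cb cc none (by simp)
          · -- verse line: both emit the same \id/\c/\v lines; A writes its final look-ahead line,
            -- B writes the plain line and opens a pending entry
            simp only [hs, hr, he, if_false, Bool.false_eq_true, or_self]
            set books1 := if some hb ≠ cb then books.insert hb (books.getD hb [] ++ ["\\id " ++ hb]) else books with hb1
            set cc1 : Option Int := if some hb ≠ cb then none else cc with hcc1
            set books2 := if some hc ≠ cc1 then books1.insert hb (books1.getD hb [] ++ ["\\c " ++ PySem.Int.toStr hc]) else books1 with hb2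
            have hstep := ih books2 (some hb) (some hc)
              (some (hb, hc, hv, PySem.Str.strip ht, books2.getD hb [], hv))
              (by
                intro b c v ptext base ev h
                simp only [Option.some.injEq, Prod.mk.injEq] at h
                obtain ⟨rfl, rfl, rfl, rfl, rfl, rfl⟩ := h
                exact ⟨rfl, by simpa using hs⟩)
            simpa [pvAB, pvBB, pvPP, pvFin] using hstep
    cases p with
    | none => exact hnone books cb cc
    | some q =>
      obtain ⟨b, c, v, ptext, base, ev⟩ := q
      obtain ⟨hbase, hskip⟩ := hp b c v ptext base ev rfl
      by_cases hM : hb = b ∧ hc = c ∧ PySem.Str.strip ht = "<range>"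
      · obtain ⟨rfl, rfl, hr⟩ := hM
        -- A skips the marker; its look-ahead already advanced. B rewrites the stored line.
        have hA : pvAB books (some (hb, hc, v, ptext, base, ev)) (((hb, hc, hv), ht) :: tl) =
            pvAB books (some (hb, hc, v, ptext, base, hv)) tl := by
          simp [pvAB, pvLookA, hr]
        have hSet : ((base ++ [pvFin v ev ptext]).set base.length (pvFin v hv ptext)) =
            base ++ [pvFin v hv ptext] := by
          simp
        have hstep := ih books cb cc (some (hb, hc, v, ptext, base, hv))
          (by
            intro b' c' v' ptext' base' ev' h
            simp only [Option.some.injEq, Prod.mk.injEq] at h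
            obtain ⟨rfl, rfl, rfl, rfl, rfl, rfl⟩ := h
            exact ⟨hbase, hskip⟩)
        rw [hA]
        -- evaluate one step of each loop: A skips the marker, B rewrites the stored line
        simp only [pvLoopA, pvLoopB, pvAB, pvBB, pvPP, hskip, hr] at hstep ⊢
        simpa [PySem.Dict.getD_insert_self, hSet, PySem.Dict.insert_insert_self, pvFin] using hstep
      · -- the head breaks the chain: A's stored line is final, B clears/replaces pending
        have hA : pvAB books (some (b, c, v, ptext, base, ev)) (((hb, hc, hv), ht) :: tl) =
            pvBB books (some (b, c, v, ptext, base, ev)) := by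
          simp [pvAB, pvBB, pvLookA, hM]
        rw [hA]
        simp only [pvPP]
        rw [pvLoopB_clear bf hb hc hv ht tl _ cb cc b c v ptext base.length hM]
        exact hnone _ cb cc

lemma pv_main (bf : Option String) (l : List ((String × Int × Int) × String)) :
    pvLoopA bf l PySem.Dict.empty none none = pvLoopB bf l PySem.Dict.empty none none none := by
  simpa using pvJoint bf l PySem.Dict.empty none none none (by simp)

-- ===== VERDICT (by name: the statement is the Claim_ definition above) =====
theorem convert_to_sfm_spec : Claim_equal_convert_to_sfm := by
  intro refs texts bf _ _
  unfold Spec_convert_to_sfm convert_to_sfm convert_to_sfm_alt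
  rw [pv_main]
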